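-- pv_equiv track=rewrite | github.com/scrilly23/helical_sliding_switch | socket_utils.py | make_heptad_strings
-- ===== SOURCE A (Python) =====
-- def make_heptad_strings(reg_string, seq_string):
--     a_list = []
--     b_list = []
--     c_list = []
--     d_list = []
--     e_list = []
--     f_list = []
--     g_list = []
--
--     for index, char in enumerate(reg_string):
--         if char == 'A':
--             a_list.append(seq_string[index])
--         elif char == 'B':
--             b_list.append(seq_string[index])
--         elif char == 'C':
--             c_list.append(seq_string[index])
--         elif char == 'D':
--             d_list.append(seq_string[index])
--         elif char == 'E':
--             e_list.append(seq_string[index])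
--         elif char == 'F':
--             f_list.append(seq_string[index])
--         elif char == 'G':
--             g_list.append(seq_string[index])
--         else:
--             continue
--
--     a_string = ''.join(a_list)
--     b_string = ''.join(b_list)
--     c_string = ''.join(c_list)
--     d_string = ''.join(d_list)
--     e_string = ''.join(e_list)
--     f_string = ''.join(f_list)
--     g_string = ''.join(g_list)
--
--     heptads_dict = {}
--     heptads_dict['a_residues'] = a_string
--     heptads_dict['b_residues'] = b_string
--     heptads_dict['c_residues'] = c_string
--     heptads_dict['d_residues'] = d_string
--     heptads_dict['e_residues'] = e_string
--     heptads_dict['f_residues'] = f_string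
--     heptads_dict['g_residues'] = g_string
--
--     return heptads_dict
-- ===== SOURCE B (Python) =====
-- def make_heptad_strings(reg_string, seq_string):
--     return {
--         f"{label}_residues": ''.join(
--             seq_string[i] for i, c in enumerate(reg_string) if c == letter)
--         for label, letter in zip('abcdefg', 'ABCDEFG')
--     }
-- ===== Notes on version B (the rewrite author's own statement) =====
-- stated objective: idiomatic
-- what changed: Replaces the seven named accumulator lists and one multi-way branching pass with a dict comprehension over the seven (label, letter) pairs, each collecting its residues by a filtered scan of the register string.
import Mathlib
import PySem

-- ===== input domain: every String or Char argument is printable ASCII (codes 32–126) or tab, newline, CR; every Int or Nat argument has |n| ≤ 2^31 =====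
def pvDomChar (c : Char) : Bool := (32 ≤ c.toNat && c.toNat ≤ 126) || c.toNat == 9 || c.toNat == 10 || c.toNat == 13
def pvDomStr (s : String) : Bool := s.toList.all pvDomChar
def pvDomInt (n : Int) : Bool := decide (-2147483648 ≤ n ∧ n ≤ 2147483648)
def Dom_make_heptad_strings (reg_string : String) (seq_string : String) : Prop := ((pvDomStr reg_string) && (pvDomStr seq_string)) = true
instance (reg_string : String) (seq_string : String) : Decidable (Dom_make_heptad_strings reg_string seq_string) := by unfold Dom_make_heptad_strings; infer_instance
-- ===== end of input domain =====

-- B groups the sequence into heptad registers with a dict comprehension over the seven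
-- (label, letter) pairs (one filtered scan each) instead of A's seven accumulator lists
-- fed by one multi-way branching pass; same return value, idiomatic objective.

-- ===== PORT A =====
-- the seven-list bucketing loop of A, state = (a,b,c,d,e,f,g) lists of chars
def pvAloop (seq : List Char) :
    List (Int × Char) →
    List Char × List Char × List Char × List Char × List Char × List Char × List Char →
    List Char × List Char × List Char × List Char × List Char × List Char × List Char
  | [], st => st
  | (i, ch) :: rest, (a, b, c, d, e, f, g) =>
    -- seq_string[index]; Pre_ guarantees the index is in range, so the default is never used
    let x := PySem.List.pyGetD seq i ' '
    if ch = 'A' then pvAloop seq rest (a ++ [x], b, c, d, e, f, g)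
    else if ch = 'B' then pvAloop seq rest (a, b ++ [x], c, d, e, f, g)
    else if ch = 'C' then pvAloop seq rest (a, b, c ++ [x], d, e, f, g)
    else if ch = 'D' then pvAloop seq rest (a, b, c, d ++ [x], e, f, g)
    else if ch = 'E' then pvAloop seq rest (a, b, c, d, e ++ [x], f, g)
    else if ch = 'F' then pvAloop seq rest (a, b, c, d, e, f ++ [x], g)
    else if ch = 'G' then pvAloop seq rest (a, b, c, d, e, f, g ++ [x])
    else pvAloop seq rest (a, b, c, d, e, f, g)

def make_heptad_strings (reg_string : String) (seq_string : String) : List (String × String) :=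
  let st := pvAloop seq_string.toList (PySem.List.enumerate reg_string.toList 0)
              ([], [], [], [], [], [], [])
  -- heptads_dict built by seven inserts of distinct fresh keys, in this order
  [("a_residues", String.ofList st.1),
   ("b_residues", String.ofList st.2.1),
   ("c_residues", String.ofList st.2.2.1),
   ("d_residues", String.ofList st.2.2.2.1),
   ("e_residues", String.ofList st.2.2.2.2.1),
   ("f_residues", String.ofList st.2.2.2.2.2.1),
   ("g_residues", String.ofList st.2.2.2.2.2.2)]

-- ===== PORT B =====
-- ''.join(seq_string[i] for i, c in enumerate(reg_string) if c == letter)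
def pvCollect (reg : List Char) (seq : List Char) (letter : Char) : String :=
  String.ofList (((PySem.List.enumerate reg 0).filter (fun p => p.2 = letter)).map
    (fun p => PySem.List.pyGetD seq p.1 ' '))

def make_heptad_strings_alt (reg_string : String) (seq_string : String) : List (String × String) :=
  (List.zip ['a', 'b', 'c', 'd', 'e', 'f', 'g'] ['A', 'B', 'C', 'D', 'E', 'F', 'G']).map
    (fun p => (String.ofList [p.1] ++ "_residues",
               pvCollect reg_string.toList seq_string.toList p.2))

-- ===== PRECONDITION & SPEC =====
-- Pre_ excludes exactly the inputs where A raises IndexError: a register position holding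
-- one of the letters A–G whose index is out of range of seq_string.
def Pre_make_heptad_strings (reg_string : String) (seq_string : String) : Prop :=
  ∀ k : Nat, k < reg_string.toList.length →
    reg_string.toList.getD k ' ' ∈ (['A', 'B', 'C', 'D', 'E', 'F', 'G'] : List Char) →
    k < seq_string.toList.length
instance (reg_string : String) (seq_string : String) : Decidable (Pre_make_heptad_strings reg_string seq_string) := by
  unfold Pre_make_heptad_strings; infer_instance

def pvWitness_make_heptad_strings : String × String := ("AXbG", "wxyz")

def Spec_make_heptad_strings (reg_string : String) (seq_string : String) (out : List (String × String)) : Prop := out = make_heptad_strings_alt reg_string seq_string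
instance (reg_string : String) (seq_string : String) (out : List (String × String)) : Decidable (Spec_make_heptad_strings reg_string seq_string out) := by unfold Spec_make_heptad_strings; infer_instance

-- ===== CLAIM (what is proved, stated in full; the proofs are below) =====
def Claim_equal_make_heptad_strings : Prop := ∀ (reg_string : String) (seq_string : String), Dom_make_heptad_strings reg_string seq_string → Pre_make_heptad_strings reg_string seq_string → Spec_make_heptad_strings reg_string seq_string (make_heptad_strings reg_string seq_string)

-- ===== LEMMAS AND PROOFS =====

-- the chars B's filtered scan collects for one letter
def pvF (seq : List Char) (l : List (Int × Char)) (c : Char) : List Char :=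
  ((l.filter (fun p => p.2 = c)).map (fun p => PySem.List.pyGetD seq p.1 ' '))

lemma pvAloop_eq (seq : List Char) (l : List (Int × Char))
    (a b c d e f g : List Char) :
    pvAloop seq l (a, b, c, d, e, f, g) =
      (a ++ pvF seq l 'A', b ++ pvF seq l 'B', c ++ pvF seq l 'C', d ++ pvF seq l 'D',
       e ++ pvF seq l 'E', f ++ pvF seq l 'F', g ++ pvF seq l 'G') := by
  induction l generalizing a b c d e f g with
  | nil => simp [pvAloop, pvF]
  | cons p rest ih =>
    obtain ⟨i, ch⟩ := p
    simp only [pvAloop]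
    split_ifs with h1 h2 h3 h4 h5 h6 h7 <;>
      simp_all [pvF]

theorem make_heptad_strings_spec : Claim_equal_make_heptad_strings := by
  intro reg seq _hDom _hPre
  unfold Spec_make_heptad_strings
  unfold make_heptad_strings make_heptad_strings_alt
  rw [pvAloop_eq]
  simp [pvCollect, pvF]
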